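-- pv_equiv track=rewrite | github.com/scorchedrice/sw_study | python/ssafy_2_study/study_4_2.py | cal_time
-- ===== SOURCE A (Python) =====
-- def cal_time(N):
--     num_list_1 = list(range(0,6))
--     num_list_2 = list(range(0,10))
--     num_total = []
--     for min_1 in num_list_1:
--         for min_2 in num_list_2:
--             for sec_1 in num_list_1:
--                 for sec_2 in num_list_2:
--                     num_total = num_total + [[min_1, min_2, sec_1, sec_2]]
--                     # [0,0,0,0] ~ [5,9,5,9] 로 00분 00초부터 59분 59초 까지 리스트화
--
--     default = 0
--     for i in range(0,len(num_total)):
--         if 3 in num_total[i]: # 리스트 중에 3이 존재한다면 1을 더해서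
--             default = default + 1 # 3이 있는 것이 몇개인지 구하고
--
--     ans = 0
--     for i in range(0,N+1): # N이 주어졌을때, 0시, 1시 ... 순서대로 계산을 하되
--         if i == 3 or i == 13 or i == 23: # 3이 들어있는 시간인 경우는 3600을 더한다.
--             ans = ans + 3600
--         else: # 그 외의 상황에는 전에 구한 default값을 더하는 과정을 반복한다.
--             ans = ans + default
--     return ans
-- ===== SOURCE B (Python) =====
-- def cal_time(N):
--     total = max(N + 1, 0)
--     threes = sum(1 for h in (3, 13, 23) if h <= N)
--     return threes * 3600 + (total - threes) * 1575
-- ===== Notes on version B (the rewrite author's own statement) =====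
-- stated objective: faster
-- what changed: B replaces A's 3600-quadruple enumeration (built by quadratic repeated list concatenation) and its per-hour loop with an O(1) closed form: the constant 1575 digit-3 seconds per ordinary hour times the number of non-3 hours plus 3600 for each hour in {3,13,23} not exceeding N.
import Mathlib
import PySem

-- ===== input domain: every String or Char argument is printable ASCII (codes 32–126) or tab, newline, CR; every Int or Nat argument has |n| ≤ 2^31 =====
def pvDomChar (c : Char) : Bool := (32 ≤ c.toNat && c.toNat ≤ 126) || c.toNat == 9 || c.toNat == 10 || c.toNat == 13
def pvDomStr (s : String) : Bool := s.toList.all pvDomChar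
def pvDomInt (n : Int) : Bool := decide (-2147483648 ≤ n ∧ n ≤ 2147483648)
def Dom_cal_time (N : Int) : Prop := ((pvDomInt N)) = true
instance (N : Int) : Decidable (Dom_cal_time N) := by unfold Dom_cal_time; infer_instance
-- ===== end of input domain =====

-- B replaces A's O(N)-plus-3600²-work enumeration with an O(1) closed form: 1575 seconds
-- containing a 3 per ordinary hour, 3600 for hours 3/13/23.

-- ===== PORT A =====
-- the quadruple-nested loop building num_total by repeated 'num_total + [[...]]'
def pvNumTotal : List (List Int) :=
  (PySem.List.pyRange 0 6 1).foldl (fun acc m1 =>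
    (PySem.List.pyRange 0 10 1).foldl (fun acc m2 =>
      (PySem.List.pyRange 0 6 1).foldl (fun acc s1 =>
        (PySem.List.pyRange 0 10 1).foldl (fun acc s2 =>
          acc ++ [[m1, m2, s1, s2]]) acc) acc) acc) []

-- the 'for i in range(0, len(num_total)): if 3 in num_total[i]: default += 1' loop
def pvDefault : Int :=
  (PySem.List.pyRange 0 (pvNumTotal.length : Int) 1).foldl
    (fun d i => if (3 : Int) ∈ PySem.List.pyGetD pvNumTotal i [] then d + 1 else d) 0

def cal_time (N : Int) : Int :=
  (PySem.List.pyRange 0 (N + 1) 1).foldl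
    (fun ans i => if i = 3 ∨ i = 13 ∨ i = 23 then ans + 3600 else ans + pvDefault) 0

-- ===== PORT B =====
def cal_time_alt (N : Int) : Int :=
  let total := max (N + 1) 0
  let threes := (([3, 13, 23] : List Int).map (fun h => if h ≤ N then (1 : Int) else 0)).sum
  threes * 3600 + (total - threes) * 1575

-- ===== PRECONDITION & SPEC =====
def Spec_cal_time (N : Int) (out : Int) : Prop := out = cal_time_alt N
instance (N : Int) (out : Int) : Decidable (Spec_cal_time N out) := by unfold Spec_cal_time; infer_instance

-- ===== CLAIM (what is proved, stated in full; the proofs are below) =====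
def Claim_equal_cal_time : Prop := ∀ (N : Int), Dom_cal_time N → Spec_cal_time N (cal_time N)

-- ===== LEMMAS AND PROOFS =====

theorem pvNumTotal_eq : pvNumTotal =
    (PySem.List.pyRange 0 6 1).flatMap (fun m1 =>
      (PySem.List.pyRange 0 10 1).flatMap (fun m2 =>
        (PySem.List.pyRange 0 6 1).flatMap (fun s1 =>
          (PySem.List.pyRange 0 10 1).flatMap (fun s2 => [[m1, m2, s1, s2]])))) := by
  unfold pvNumTotal
  simp only [PySem.List.foldl_append_eq_flatMap, List.nil_append]

set_option maxRecDepth 20000 in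
theorem pvDefault_eq : pvDefault = 1575 := by
  unfold pvDefault
  rw [PySem.List.foldl_pyRange_zero_pyGetD' pvNumTotal []
      (fun d l => if (3 : Int) ∈ l then d + 1 else d) 0, pvNumTotal_eq]
  decide

-- the hour loop of A equals B's closed form, for any upper bound n of the range
theorem hourLoop (d : Int) : ∀ (n : Nat),
    (PySem.List.pyRange 0 (n : Int) 1).foldl
      (fun ans i => if i = 3 ∨ i = 13 ∨ i = 23 then ans + 3600 else ans + d) 0
    = ((if (3 : Int) < n then (1:Int) else 0) + (if (13 : Int) < n then (1:Int) else 0)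
        + (if (23 : Int) < n then (1:Int) else 0)) * 3600
      + ((n : Int) - ((if (3 : Int) < n then (1:Int) else 0) + (if (13 : Int) < n then (1:Int) else 0)
        + (if (23 : Int) < n then (1:Int) else 0))) * d := by
  intro n
  induction n with
  | zero => simp [PySem.List.pyRange_one_eq_nil]
  | succ m ih =>
    rw [show ((m + 1 : Nat) : Int) = (m : Int) + 1 by push_cast; ring,
        PySem.List.pyRange_one_succ_right (a := 0) (b := (m : Int)) (by omega),
        List.foldl_append, ih]
    simp only [List.foldl_cons, List.foldl_nil]
    split_ifs <;> (try (exfalso; omega)) <;> ring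

-- ===== VERDICT (by name: the statement is the Claim_ definition above) =====
theorem cal_time_spec : Claim_equal_cal_time := by
  intro N _
  unfold Spec_cal_time cal_time cal_time_alt
  rw [pvDefault_eq]
  by_cases h : 0 ≤ N + 1
  · rw [show N + 1 = ((N + 1).toNat : Int) by omega, hourLoop 1575 (N + 1).toNat]
    simp only [List.map_cons, List.map_nil, List.sum_cons, List.sum_nil]
    split_ifs <;> omega
  · rw [PySem.List.pyRange_one_eq_nil (by omega)]
    simp only [List.foldl_nil, List.map_cons, List.map_nil, List.sum_cons, List.sum_nil]
    split_ifs <;> omega
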